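-- pv_equiv track=rewrite | github.com/Tcooper4/Evolve | reporting/explainer_agent.py | _categorize_factors
-- ===== SOURCE A (Python) =====
-- from typing import Dict, List, Optional, Any, Union, Tuple
--
-- def _categorize_factors(factors: List[str]) -> Dict[str, List[str]]:
--     """Categorize factors by type"""
--     categories = {
--         'technical': [],
--         'fundamental': [],
--         'sentiment': [],
--         'macro': [],
--         'other': []
--     }
--
--     for factor in factors:
--         factor_lower = factor.lower()
--         if any(tech in factor_lower for tech in ['rsi', 'macd', 'bollinger', 'moving_average']):
--             categories['technical'].append(factor)
--         elif any(fund in factor_lower for fund in ['earnings', 'revenue', 'pe_ratio', 'book_value']):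
--             categories['fundamental'].append(factor)
--         elif any(sent in factor_lower for sent in ['sentiment', 'news', 'social']):
--             categories['sentiment'].append(factor)
--         elif any(macro in factor_lower for macro in ['gdp', 'inflation', 'interest_rate', 'fed']):
--             categories['macro'].append(factor)
--         else:
--             categories['other'].append(factor)
--
--     return {k: v for k, v in categories.items() if v}
-- ===== SOURCE B (Python) =====
-- _RULES = [
--     ('technical', ('rsi', 'macd', 'bollinger', 'moving_average')),
--     ('fundamental', ('earnings', 'revenue', 'pe_ratio', 'book_value')),
--     ('sentiment', ('sentiment', 'news', 'social')),
--     ('macro', ('gdp', 'inflation', 'interest_rate', 'fed')),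
-- ]
--
-- def _classify(factor):
--     factor_lower = factor.lower()
--     for category, keywords in _RULES:
--         if any(kw in factor_lower for kw in keywords):
--             return category
--     return 'other'
--
-- def _categorize_factors(factors):
--     """Categorize factors by type (category-major grouping)."""
--     result = {}
--     for category in ('technical', 'fundamental', 'sentiment', 'macro', 'other'):
--         bucket = [f for f in factors if _classify(f) == category]
--         if bucket:
--             result[category] = bucket
--     return result
-- ===== Notes on version B (the rewrite author's own statement) =====
-- stated objective: alternative
-- what changed: A makes one factor-major pass with an if/elif chain appending into a 5-bucket dict and then filters empty buckets; B factors the chain into a data-driven rules table with a first-match classifier and builds the result category-major, one filter pass of the factor list per category, keeping only non-empty groups.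
import Mathlib
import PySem

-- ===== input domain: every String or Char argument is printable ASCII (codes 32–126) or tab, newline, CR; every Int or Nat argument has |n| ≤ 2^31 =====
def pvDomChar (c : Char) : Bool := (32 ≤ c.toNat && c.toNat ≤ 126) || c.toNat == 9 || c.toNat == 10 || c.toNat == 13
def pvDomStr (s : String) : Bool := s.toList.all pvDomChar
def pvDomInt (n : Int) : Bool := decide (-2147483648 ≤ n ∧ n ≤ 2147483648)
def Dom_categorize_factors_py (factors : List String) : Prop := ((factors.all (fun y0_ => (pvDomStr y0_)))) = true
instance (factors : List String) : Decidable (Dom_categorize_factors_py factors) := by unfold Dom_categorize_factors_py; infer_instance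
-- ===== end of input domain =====

-- B replaces A's factor-major if/elif dict-accumulation by a category-major grouping: one filter pass per
-- category over a rules table; same return value, an alternative decomposition (no speed claim).

-- ===== PORT A =====
-- one loop iteration of A: lowercase, if/elif keyword chain, append to the matching bucket
def aStep (categories : PySem.Dict String (List String)) (factor : String) : PySem.Dict String (List String) :=
  let factor_lower := PySem.Str.lower factor
  if List.any ["rsi", "macd", "bollinger", "moving_average"] (fun kw => PySem.Str.isIn kw factor_lower) then
    categories.modify "technical" [] (· ++ [factor])
  else if List.any ["earnings", "revenue", "pe_ratio", "book_value"] (fun kw => PySem.Str.isIn kw factor_lower) then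
    categories.modify "fundamental" [] (· ++ [factor])
  else if List.any ["sentiment", "news", "social"] (fun kw => PySem.Str.isIn kw factor_lower) then
    categories.modify "sentiment" [] (· ++ [factor])
  else if List.any ["gdp", "inflation", "interest_rate", "fed"] (fun kw => PySem.Str.isIn kw factor_lower) then
    categories.modify "macro" [] (· ++ [factor])
  else
    categories.modify "other" [] (· ++ [factor])

def categorize_factors_py (factors : List String) : List (String × List String) :=
  let categories : PySem.Dict String (List String) :=
    PySem.Dict.ofList [("technical", []), ("fundamental", []), ("sentiment", []), ("macro", []), ("other", [])]
  let final := factors.foldl aStep categories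
  -- {k: v for k, v in categories.items() if v} (a dict is a List (K × V) here)
  final.items.filter (fun kv => !kv.2.isEmpty)

-- ===== PORT B =====
def bRules : List (String × List String) :=
  [("technical", ["rsi", "macd", "bollinger", "moving_average"]),
   ("fundamental", ["earnings", "revenue", "pe_ratio", "book_value"]),
   ("sentiment", ["sentiment", "news", "social"]),
   ("macro", ["gdp", "inflation", "interest_rate", "fed"])]

-- the 'for category, keywords in _RULES: … return category' loop of _classify
def bFirstMatch (factor_lower : String) : List (String × List String) → String
  | [] => "other"
  | (category, keywords) :: rest =>
    if List.any keywords (fun kw => PySem.Str.isIn kw factor_lower) then category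
    else bFirstMatch factor_lower rest

def bClassify (factor : String) : String := bFirstMatch (PySem.Str.lower factor) bRules

def categorize_factors_py_alt (factors : List String) : List (String × List String) :=
  ["technical", "fundamental", "sentiment", "macro", "other"].foldl
    (fun result category =>
      let bucket := factors.filter (fun f => bClassify f == category)
      if bucket.isEmpty then result else result ++ [(category, bucket)])
    []

-- ===== PRECONDITION & SPEC =====
def Spec_categorize_factors_py (factors : List String) (out : List (String × List String)) : Prop := out = categorize_factors_py_alt factors
instance (factors : List String) (out : List (String × List String)) : Decidable (Spec_categorize_factors_py factors out) := by unfold Spec_categorize_factors_py; infer_instance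

-- ===== CLAIM (what is proved, stated in full; the proofs are below) =====
def Claim_equal_categorize_factors_py : Prop := ∀ (factors : List String), Dom_categorize_factors_py factors → Spec_categorize_factors_py factors (categorize_factors_py factors)

-- ===== LEMMAS AND PROOFS =====
-- decided comparisons of the five category keys (kept out of simp's whnf)
lemma beq_technical_technical : (("technical":String) == "technical") = true := by decide
lemma beq_technical_fundamental : (("technical":String) == "fundamental") = false := by decide
lemma beq_technical_sentiment : (("technical":String) == "sentiment") = false := by decide
lemma beq_technical_macro : (("technical":String) == "macro") = false := by decide
lemma beq_technical_other : (("technical":String) == "other") = false := by decide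
lemma beq_fundamental_technical : (("fundamental":String) == "technical") = false := by decide
lemma beq_fundamental_fundamental : (("fundamental":String) == "fundamental") = true := by decide
lemma beq_fundamental_sentiment : (("fundamental":String) == "sentiment") = false := by decide
lemma beq_fundamental_macro : (("fundamental":String) == "macro") = false := by decide
lemma beq_fundamental_other : (("fundamental":String) == "other") = false := by decide
lemma beq_sentiment_technical : (("sentiment":String) == "technical") = false := by decide
lemma beq_sentiment_fundamental : (("sentiment":String) == "fundamental") = false := by decide
lemma beq_sentiment_sentiment : (("sentiment":String) == "sentiment") = true := by decide
lemma beq_sentiment_macro : (("sentiment":String) == "macro") = false := by decide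
lemma beq_sentiment_other : (("sentiment":String) == "other") = false := by decide
lemma beq_macro_technical : (("macro":String) == "technical") = false := by decide
lemma beq_macro_fundamental : (("macro":String) == "fundamental") = false := by decide
lemma beq_macro_sentiment : (("macro":String) == "sentiment") = false := by decide
lemma beq_macro_macro : (("macro":String) == "macro") = true := by decide
lemma beq_macro_other : (("macro":String) == "other") = false := by decide
lemma beq_other_technical : (("other":String) == "technical") = false := by decide
lemma beq_other_fundamental : (("other":String) == "fundamental") = false := by decide
lemma beq_other_sentiment : (("other":String) == "sentiment") = false := by decide
lemma beq_other_macro : (("other":String) == "macro") = false := by decide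
lemma beq_other_other : (("other":String) == "other") = true := by decide

-- the state of A's loop: the five buckets of the literal dict, keys fixed
def mkD (l1 l2 l3 l4 l5 : List String) : PySem.Dict String (List String) :=
  PySem.Dict.mk [("technical", l1), ("fundamental", l2), ("sentiment", l3), ("macro", l4), ("other", l5)]

-- appending to each bucket of the literal dict
lemma mod_technical (l1 l2 l3 l4 l5 : List String) (f : String) :
  (mkD l1 l2 l3 l4 l5).modify "technical" [] (· ++ [f]) = mkD (l1 ++ [f]) l2 l3 l4 l5 := by rfl
lemma mod_fundamental (l1 l2 l3 l4 l5 : List String) (f : String) :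
  (mkD l1 l2 l3 l4 l5).modify "fundamental" [] (· ++ [f]) = mkD l1 (l2 ++ [f]) l3 l4 l5 := by rfl
lemma mod_sentiment (l1 l2 l3 l4 l5 : List String) (f : String) :
  (mkD l1 l2 l3 l4 l5).modify "sentiment" [] (· ++ [f]) = mkD l1 l2 (l3 ++ [f]) l4 l5 := by rfl
lemma mod_macro (l1 l2 l3 l4 l5 : List String) (f : String) :
  (mkD l1 l2 l3 l4 l5).modify "macro" [] (· ++ [f]) = mkD l1 l2 l3 (l4 ++ [f]) l5 := by rfl
lemma mod_other (l1 l2 l3 l4 l5 : List String) (f : String) :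
  (mkD l1 l2 l3 l4 l5).modify "other" [] (· ++ [f]) = mkD l1 l2 l3 l4 (l5 ++ [f]) := by rfl

-- A's loop, started from any bucket contents, appends exactly the factors B classifies into each bucket
lemma loop_inv (fs : List String) (l1 l2 l3 l4 l5 : List String) :
    fs.foldl aStep (mkD l1 l2 l3 l4 l5) =
    mkD (l1 ++ fs.filter (fun f => bClassify f == "technical"))
      (l2 ++ fs.filter (fun f => bClassify f == "fundamental"))
      (l3 ++ fs.filter (fun f => bClassify f == "sentiment"))
      (l4 ++ fs.filter (fun f => bClassify f == "macro"))
      (l5 ++ fs.filter (fun f => bClassify f == "other")) := by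
  induction fs generalizing l1 l2 l3 l4 l5 with
  | nil => simp
  | cons f fs ih =>
    cases h1 : List.any ["rsi", "macd", "bollinger", "moving_average"] (fun kw => PySem.Str.isIn kw (PySem.Str.lower f)) with
    | true => simp only [List.foldl_cons, List.filter_cons, aStep, bClassify, bRules, bFirstMatch, h1, eq_self_iff_true, if_true, Bool.false_eq_true, if_false, mod_technical, mod_fundamental, mod_sentiment, mod_macro, mod_other, ih, beq_technical_technical, beq_technical_fundamental, beq_technical_sentiment, beq_technical_macro, beq_technical_other, beq_fundamental_technical, beq_fundamental_fundamental, beq_fundamental_sentiment, beq_fundamental_macro, beq_fundamental_other, beq_sentiment_technical, beq_sentiment_fundamental, beq_sentiment_sentiment, beq_sentiment_macro, beq_sentiment_other, beq_macro_technical, beq_macro_fundamental, beq_macro_sentiment, beq_macro_macro, beq_macro_other, beq_other_technical, beq_other_fundamental, beq_other_sentiment, beq_other_macro, beq_other_other, List.append_assoc, List.cons_append, List.nil_append]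
    | false =>
    cases h2 : List.any ["earnings", "revenue", "pe_ratio", "book_value"] (fun kw => PySem.Str.isIn kw (PySem.Str.lower f)) with
    | true => simp only [List.foldl_cons, List.filter_cons, aStep, bClassify, bRules, bFirstMatch, h1, h2, eq_self_iff_true, if_true, Bool.false_eq_true, if_false, mod_technical, mod_fundamental, mod_sentiment, mod_macro, mod_other, ih, beq_technical_technical, beq_technical_fundamental, beq_technical_sentiment, beq_technical_macro, beq_technical_other, beq_fundamental_technical, beq_fundamental_fundamental, beq_fundamental_sentiment, beq_fundamental_macro, beq_fundamental_other, beq_sentiment_technical, beq_sentiment_fundamental, beq_sentiment_sentiment, beq_sentiment_macro, beq_sentiment_other, beq_macro_technical, beq_macro_fundamental, beq_macro_sentiment, beq_macro_macro, beq_macro_other, beq_other_technical, beq_other_fundamental, beq_other_sentiment, beq_other_macro, beq_other_other, List.append_assoc, List.cons_append, List.nil_append]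
    | false =>
    cases h3 : List.any ["sentiment", "news", "social"] (fun kw => PySem.Str.isIn kw (PySem.Str.lower f)) with
    | true => simp only [List.foldl_cons, List.filter_cons, aStep, bClassify, bRules, bFirstMatch, h1, h2, h3, eq_self_iff_true, if_true, Bool.false_eq_true, if_false, mod_technical, mod_fundamental, mod_sentiment, mod_macro, mod_other, ih, beq_technical_technical, beq_technical_fundamental, beq_technical_sentiment, beq_technical_macro, beq_technical_other, beq_fundamental_technical, beq_fundamental_fundamental, beq_fundamental_sentiment, beq_fundamental_macro, beq_fundamental_other, beq_sentiment_technical, beq_sentiment_fundamental, beq_sentiment_sentiment, beq_sentiment_macro, beq_sentiment_other, beq_macro_technical, beq_macro_fundamental, beq_macro_sentiment, beq_macro_macro, beq_macro_other, beq_other_technical, beq_other_fundamental, beq_other_sentiment, beq_other_macro, beq_other_other, List.append_assoc, List.cons_append, List.nil_append]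
    | false =>
    cases h4 : List.any ["gdp", "inflation", "interest_rate", "fed"] (fun kw => PySem.Str.isIn kw (PySem.Str.lower f)) with
    | true => simp only [List.foldl_cons, List.filter_cons, aStep, bClassify, bRules, bFirstMatch, h1, h2, h3, h4, eq_self_iff_true, if_true, Bool.false_eq_true, if_false, mod_technical, mod_fundamental, mod_sentiment, mod_macro, mod_other, ih, beq_technical_technical, beq_technical_fundamental, beq_technical_sentiment, beq_technical_macro, beq_technical_other, beq_fundamental_technical, beq_fundamental_fundamental, beq_fundamental_sentiment, beq_fundamental_macro, beq_fundamental_other, beq_sentiment_technical, beq_sentiment_fundamental, beq_sentiment_sentiment, beq_sentiment_macro, beq_sentiment_other, beq_macro_technical, beq_macro_fundamental, beq_macro_sentiment, beq_macro_macro, beq_macro_other, beq_other_technical, beq_other_fundamental, beq_other_sentiment, beq_other_macro, beq_other_other, List.append_assoc, List.cons_append, List.nil_append]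
    | false => simp only [List.foldl_cons, List.filter_cons, aStep, bClassify, bRules, bFirstMatch, h1, h2, h3, h4, eq_self_iff_true, if_true, Bool.false_eq_true, if_false, mod_technical, mod_fundamental, mod_sentiment, mod_macro, mod_other, ih, beq_technical_technical, beq_technical_fundamental, beq_technical_sentiment, beq_technical_macro, beq_technical_other, beq_fundamental_technical, beq_fundamental_fundamental, beq_fundamental_sentiment, beq_fundamental_macro, beq_fundamental_other, beq_sentiment_technical, beq_sentiment_fundamental, beq_sentiment_sentiment, beq_sentiment_macro, beq_sentiment_other, beq_macro_technical, beq_macro_fundamental, beq_macro_sentiment, beq_macro_macro, beq_macro_other, beq_other_technical, beq_other_fundamental, beq_other_sentiment, beq_other_macro, beq_other_other, List.append_assoc, List.cons_append, List.nil_append]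

-- ===== VERDICT (by name: the statement is the Claim_ definition above) =====
theorem categorize_factors_py_spec : Claim_equal_categorize_factors_py := by
  intro factors _
  unfold Spec_categorize_factors_py categorize_factors_py categorize_factors_py_alt
  show (factors.foldl aStep (mkD [] [] [] [] [])).items.filter (fun kv => !kv.2.isEmpty) = _
  rw [loop_inv]
  simp only [List.nil_append, mkD, List.foldl_cons, List.foldl_nil, List.filter_cons, List.filter_nil]
  by_cases e1 : (factors.filter (fun f => bClassify f == "technical")).isEmpty <;>
  by_cases e2 : (factors.filter (fun f => bClassify f == "fundamental")).isEmpty <;>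
  by_cases e3 : (factors.filter (fun f => bClassify f == "sentiment")).isEmpty <;>
  by_cases e4 : (factors.filter (fun f => bClassify f == "macro")).isEmpty <;>
  by_cases e5 : (factors.filter (fun f => bClassify f == "other")).isEmpty <;>
  simp [e1, e2, e3, e4, e5, PySem.Dict.items]
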